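-- pv_equiv track=rewrite | github.com/leto19/mimir | qa/corpus_utils/ner_pipeline.py | clash
-- ===== SOURCE A (Python) =====
-- def clash(dict1, dict2):
-- 	""" If there is a clash between two dictionaries
-- 		(i.e. there is at least one shared key
-- 			 with a different value)
-- 			returns True
-- 		else, returns False """
--
-- 	keys1 = set(dict1.keys())
-- 	keys2 = set(dict2.keys())
--
-- 	both_keys = keys1.intersection(keys2)
--
-- 	for k in both_keys:
-- 		if dict1[k] != dict2[k]:
-- 			return True
-- 	else:
-- 		return False
-- ===== SOURCE B (Python) =====
-- def clash(dict1, dict2):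
--     """ If there is a clash between two dictionaries
--         (i.e. there is at least one shared key with a different value)
--         returns True, else returns False """
--     # Cardinality argument: every key of either dict contributes exactly one
--     # element to the union of the key-sets, and contributes two elements to the
--     # union of the item-sets exactly when it is shared with differing values.
--     items = set(dict1.items()) | set(dict2.items())
--     keys = set(dict1) | set(dict2)
--     return len(items) > len(keys)
-- ===== Notes on version B (the rewrite author's own statement) =====
-- stated objective: alternative
-- what changed: B replaces A's key-intersection-and-compare loop with a cardinality argument: it never compares two values for a key; it builds the union of the two item-sets and the union of the two key-sets and reports a clash exactly when the item union is strictly larger (a shared key with differing values contributes two items but one key).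
import Mathlib
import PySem

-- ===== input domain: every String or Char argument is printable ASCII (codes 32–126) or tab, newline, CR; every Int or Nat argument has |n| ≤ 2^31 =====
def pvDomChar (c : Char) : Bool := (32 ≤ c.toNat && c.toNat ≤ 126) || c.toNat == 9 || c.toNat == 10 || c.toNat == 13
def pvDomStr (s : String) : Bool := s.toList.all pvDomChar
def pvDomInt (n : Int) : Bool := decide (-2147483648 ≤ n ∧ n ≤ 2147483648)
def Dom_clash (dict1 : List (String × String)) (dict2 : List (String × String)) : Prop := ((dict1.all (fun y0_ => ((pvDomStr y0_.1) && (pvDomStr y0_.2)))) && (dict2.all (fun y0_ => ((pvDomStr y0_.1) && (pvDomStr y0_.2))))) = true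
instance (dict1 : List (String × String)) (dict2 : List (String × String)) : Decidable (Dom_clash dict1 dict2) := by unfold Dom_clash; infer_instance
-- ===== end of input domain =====

-- B detects the clash by cardinality (|items1 ∪ items2| > |keys1 ∪ keys2|) instead of
-- A's key-set intersection with a per-key value comparison (objective: alternative).

-- ===== PORT A =====
-- keys1/keys2 = set(dict.keys()); both_keys = their intersection; the for/else loop
-- with an early `return True` over both_keys is Set.any (order-independent consumer).
-- dict[k] is first-match lookup get? (k is in both dicts here, so comparing the two
-- `some` values is exact).
def clash (dict1 : List (String × String)) (dict2 : List (String × String)) : Bool :=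
  let keys1 := PySem.Set.ofList (dict1.map Prod.fst)
  let keys2 := PySem.Set.ofList (dict2.map Prod.fst)
  let both_keys := PySem.Set.inter keys1 keys2
  both_keys.any (fun k => (PySem.Dict.mk dict1).get? k != (PySem.Dict.mk dict2).get? k)

-- ===== PORT B =====
-- items = set(dict1.items()) | set(dict2.items()); keys = set(dict1) | set(dict2);
-- return len(items) > len(keys).  dictN.items() is the association list itself and
-- set(dictN) its key list (exact: a Python dict has no duplicate keys — see Pre_).
def clash_alt (dict1 : List (String × String)) (dict2 : List (String × String)) : Bool :=
  let items := PySem.Set.union (PySem.Set.ofList dict1) dict2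
  let keys := PySem.Set.union (PySem.Set.ofList (dict1.map Prod.fst)) (dict2.map Prod.fst)
  decide (PySem.Set.len items > PySem.Set.len keys)

-- ===== PRECONDITION & SPEC =====
-- Pre_ only requires each association list to have pairwise-distinct keys: every
-- Python dict satisfies this (duplicate keys cannot occur in a dict), so no input
-- the Python A accepts is excluded; it merely rules out lists that model no dict.
def Pre_clash (dict1 : List (String × String)) (dict2 : List (String × String)) : Prop :=
  (dict1.map Prod.fst).Nodup ∧ (dict2.map Prod.fst).Nodup
instance (dict1 : List (String × String)) (dict2 : List (String × String)) : Decidable (Pre_clash dict1 dict2) := by unfold Pre_clash; infer_instance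
def pvWitness_clash : (List (String × String)) × (List (String × String)) :=
  ([("a", "x"), ("b", "y")], [("a", "z")])
def Spec_clash (dict1 : List (String × String)) (dict2 : List (String × String)) (out : Bool) : Prop := out = clash_alt dict1 dict2
instance (dict1 : List (String × String)) (dict2 : List (String × String)) (out : Bool) : Decidable (Spec_clash dict1 dict2 out) := by unfold Spec_clash; infer_instance

-- ===== CLAIM (what is proved, stated in full; the proofs are below) =====
def Claim_equal_clash : Prop := ∀ (dict1 : List (String × String)) (dict2 : List (String × String)), Dom_clash dict1 dict2 → Pre_clash dict1 dict2 → Spec_clash dict1 dict2 (clash dict1 dict2)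

-- ===== LEMMAS AND PROOFS =====

-- Both programs decide the same proposition: "some pair of dict2 has a key of dict1
-- but is itself not a pair of dict1" (with distinct keys per dict, that pair's key is
-- shared and its two looked-up values differ).
def ClashProp (dict1 dict2 : List (String × String)) : Prop :=
  ∃ p ∈ dict2, p.1 ∈ dict1.map Prod.fst ∧ p ∉ dict1

-- set-union of a duplicate-free iterable appends its new elements
theorem union_eq_append_filter {α : Type} [BEq α] [LawfulBEq α] (t s : List α) (ht : t.Nodup) :
    PySem.Set.union s t = s ++ t.filter (fun x => !PySem.Set.contains s x) := by
  induction t generalizing s with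
  | nil => simp [PySem.Set.union, PySem.Set.update]
  | cons x t ih =>
    rcases List.nodup_cons.mp ht with ⟨hx, ht'⟩
    have hstep : PySem.Set.union s (x :: t) = PySem.Set.union (PySem.Set.add s x) t := by
      simp [PySem.Set.union, PySem.Set.update]
    by_cases hmem : x ∈ s
    · have hc : PySem.Set.contains s x = true := (PySem.Set.contains_iff _ _).mpr hmem
      have hadd : PySem.Set.add s x = s := by unfold PySem.Set.add; rw [hc, if_pos rfl]
      rw [hstep, hadd, ih s ht']
      rw [List.filter_cons, hc, Bool.not_true, if_neg Bool.false_ne_true]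
    · have hc : PySem.Set.contains s x = false := by
        rw [Bool.eq_false_iff]; exact fun h => hmem ((PySem.Set.contains_iff _ _).mp h)
      have hadd : PySem.Set.add s x = s ++ [x] := by unfold PySem.Set.add; rw [hc, if_neg (by simp)]
      rw [hstep, hadd, ih _ ht']
      simp only [List.filter_cons, hc, Bool.not_false, if_true, List.append_assoc,
        List.cons_append, List.nil_append, List.append_cancel_left_eq]
      congr 1
      apply List.filter_congr
      intro y hy
      have hyx : y ≠ x := fun h => hx (h ▸ hy)
      have hcy : PySem.Set.contains (s ++ [x]) y = PySem.Set.contains s y := by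
        rw [Bool.eq_iff_iff, PySem.Set.contains_iff, PySem.Set.contains_iff]
        constructor
        · intro h
          rcases List.mem_append.mp h with h' | h'
          · exact h'
          · exact absurd (List.mem_singleton.mp h') hyx
        · exact fun h' => List.mem_append_left _ h'
      rw [hcy]

-- countP of a weaker predicate exceeds countP of a stronger one iff a witness separates them
theorem countP_lt_iff {α : Type} (l : List α) (q r : α → Bool) (h : ∀ x, q x = true → r x = true) :
    l.countP q < l.countP r ↔ ∃ x ∈ l, r x = true ∧ ¬ q x = true := by
  induction l with
  | nil => simp
  | cons a l ih =>
    have hle : l.countP q ≤ l.countP r := List.countP_mono_left (fun x _ => h x)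
    by_cases hq : q a = true
    · have hr := h a hq
      rw [List.countP_cons_of_pos hq, List.countP_cons_of_pos hr,
        Nat.add_lt_add_iff_right, ih]
      constructor
      · rintro ⟨x, hx, h1, h2⟩; exact ⟨x, List.mem_cons_of_mem _ hx, h1, h2⟩
      · rintro ⟨x, hx, h1, h2⟩
        rcases List.mem_cons.mp hx with rfl | hx
        · exact absurd hq h2
        · exact ⟨x, hx, h1, h2⟩
    · by_cases hr : r a = true
      · rw [List.countP_cons_of_pos hr, List.countP_cons_of_neg hq]
        constructor
        · intro _; exact ⟨a, List.mem_cons_self, hr, hq⟩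
        · intro _; omega
      · rw [List.countP_cons_of_neg hq, List.countP_cons_of_neg hr, ih]
        constructor
        · rintro ⟨x, hx, h1, h2⟩; exact ⟨x, List.mem_cons_of_mem _ hx, h1, h2⟩
        · rintro ⟨x, hx, h1, h2⟩
          rcases List.mem_cons.mp hx with rfl | hx
          · exact absurd h1 hr
          · exact ⟨x, hx, h1, h2⟩

-- B's cardinality test decides ClashProp
theorem clash_alt_iff (dict1 dict2 : List (String × String))
    (h1 : (dict1.map Prod.fst).Nodup) (h2 : (dict2.map Prod.fst).Nodup) :
    clash_alt dict1 dict2 = true ↔ ClashProp dict1 dict2 := by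
  have hd1 : dict1.Nodup := h1.of_map
  have hd2 : dict2.Nodup := h2.of_map
  have e : clash_alt dict1 dict2
      = decide ((((dict1 ++ dict2.filter (fun p => !PySem.Set.contains dict1 p)).length : Int))
          > (((dict1.map Prod.fst ++ (dict2.map Prod.fst).filter
                (fun k => !PySem.Set.contains (dict1.map Prod.fst) k)).length : Int))) := by
    unfold clash_alt
    dsimp only
    rw [PySem.Set.ofList_eq_self_of_nodup dict1 hd1,
        PySem.Set.ofList_eq_self_of_nodup (dict1.map Prod.fst) h1,
        union_eq_append_filter dict2 dict1 hd2,
        union_eq_append_filter (dict2.map Prod.fst) (dict1.map Prod.fst) h2]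
    simp [PySem.Set.len]
  rw [e, decide_eq_true_iff, gt_iff_lt, Int.ofNat_lt,
    List.length_append, List.length_append, List.length_map,
    ← List.countP_eq_length_filter, ← List.countP_eq_length_filter, List.countP_map,
    Nat.add_lt_add_iff_left]
  have hcomp : ((fun k => !PySem.Set.contains (dict1.map Prod.fst) k) ∘ Prod.fst)
      = (fun p : String × String => !PySem.Set.contains (dict1.map Prod.fst) p.1) := rfl
  rw [hcomp]
  have himp : ∀ p : String × String,
      (!PySem.Set.contains (dict1.map Prod.fst) p.1) = true →
      (!PySem.Set.contains dict1 p) = true := by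
    intro p hp
    rw [Bool.not_eq_eq_eq_not, Bool.not_true, Bool.eq_false_iff] at hp ⊢
    intro hc
    exact hp ((PySem.Set.contains_iff _ _).mpr
      (List.mem_map_of_mem ((PySem.Set.contains_iff _ _).mp hc)))
  rw [countP_lt_iff dict2 _ _ himp]
  unfold ClashProp
  constructor
  · rintro ⟨p, hp, hnotin, hin⟩
    rw [Bool.not_eq_eq_eq_not, Bool.not_true, Bool.eq_false_iff] at hnotin
    rw [Bool.not_eq_true, Bool.not_eq_eq_eq_not, Bool.not_false] at hin
    refine ⟨p, hp, (PySem.Set.contains_iff _ _).mp hin, fun hmem => ?_⟩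
    exact hnotin ((PySem.Set.contains_iff _ _).mpr hmem)
  · rintro ⟨p, hp, hk, hnd1⟩
    refine ⟨p, hp, ?_, ?_⟩
    · rw [Bool.not_eq_eq_eq_not, Bool.not_true, Bool.eq_false_iff]
      exact fun hc => hnd1 ((PySem.Set.contains_iff _ _).mp hc)
    · rw [Bool.not_eq_true, Bool.not_eq_eq_eq_not, Bool.not_false]
      exact (PySem.Set.contains_iff _ _).mpr hk

-- A's intersection-and-compare test decides ClashProp
theorem clash_iff (dict1 dict2 : List (String × String))
    (h1 : (dict1.map Prod.fst).Nodup) (h2 : (dict2.map Prod.fst).Nodup) :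
    clash dict1 dict2 = true ↔ ClashProp dict1 dict2 := by
  have hk1 : (PySem.Dict.mk dict1).keys = dict1.map Prod.fst := rfl
  have hk2 : (PySem.Dict.mk dict2).keys = dict2.map Prod.fst := rfl
  have hn1 : (PySem.Dict.mk dict1).keys.Nodup := by rw [hk1]; exact h1
  have hn2 : (PySem.Dict.mk dict2).keys.Nodup := by rw [hk2]; exact h2
  simp only [clash, List.any_eq_true, bne_iff_ne, ne_eq]
  constructor
  · rintro ⟨k, hk, hne⟩
    rw [PySem.Set.mem_inter, PySem.Set.mem_ofList, PySem.Set.mem_ofList] at hk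
    obtain ⟨p1, hp1, hke1⟩ := List.mem_map.mp hk.1
    obtain ⟨p2, hp2, hke2⟩ := List.mem_map.mp hk.2
    have hg1 : (PySem.Dict.mk dict1).get? k = some p1.2 :=
      PySem.Dict.get?_of_mem_items _ (by rw [← hke1]; exact hp1) hn1
    have hg2 : (PySem.Dict.mk dict2).get? k = some p2.2 :=
      PySem.Dict.get?_of_mem_items _ (by rw [← hke2]; exact hp2) hn2
    refine ⟨(k, p2.2), by rw [← hke2]; exact hp2, hk.1, fun hmem => hne ?_⟩
    have : (PySem.Dict.mk dict1).get? k = some p2.2 :=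
      PySem.Dict.get?_of_mem_items _ hmem hn1
    rw [hg1, hg2, ← this, hg1]
  · rintro ⟨p, hp, hkey, hnotin⟩
    obtain ⟨p1, hp1, hke1⟩ := List.mem_map.mp hkey
    have hg1 : (PySem.Dict.mk dict1).get? p.1 = some p1.2 :=
      PySem.Dict.get?_of_mem_items _ (by rw [← hke1]; exact hp1) hn1
    have hg2 : (PySem.Dict.mk dict2).get? p.1 = some p.2 :=
      PySem.Dict.get?_of_mem_items _ hp hn2
    refine ⟨p.1, ?_, ?_⟩
    · rw [PySem.Set.mem_inter, PySem.Set.mem_ofList, PySem.Set.mem_ofList]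
      exact ⟨hkey, List.mem_map_of_mem hp⟩
    · rw [hg1, hg2]
      intro hsome
      apply hnotin
      have hv : p1.2 = p.2 := by simpa using hsome
      have : (p.1, p1.2) ∈ dict1 := by rw [← hke1]; exact hp1
      rwa [hv] at this

-- ===== VERDICT (by name: the statement is the Claim_ definition above) =====
theorem clash_spec : Claim_equal_clash := by
  intro dict1 dict2 _ hpre
  unfold Spec_clash
  rw [Bool.eq_iff_iff, clash_iff dict1 dict2 hpre.1 hpre.2,
    clash_alt_iff dict1 dict2 hpre.1 hpre.2]
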